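-- pv_equiv track=rewrite | github.com/21A91A04H0surya/owlcoder | Medium/Count Occurences of Anagrams/count-occurences-of-anagrams.py | search
-- ===== SOURCE A (Python) =====
-- from collections import Counter
--
-- def search(pat, lst):
--     l = Counter(pat)
--     c = 0
--     n = len(pat)
--     window = Counter(lst[:n])  # Initialize the Counter for the initial window
--     if window == l:  # Check if the initial window matches the pattern
--         c += 1
--     for i in range(1, len(lst) - n + 1):  # Iterate through the list
--         window[lst[i - 1]] -= 1  # Remove the leftmost element from the window
--         if window[lst[i - 1]] == 0:  # If the count becomes zero, remove the key
--             del window[lst[i - 1]]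
--         window[lst[i + n - 1]] += 1  # Add the rightmost element to the window
--         if window == l:  # Check if the updated window matches the pattern
--             c += 1
--     return c
-- ===== SOURCE B (Python) =====
-- def search(pat, lst):
--     n = len(pat)
--     target = sorted(pat)
--     c = 0
--     for i in range(len(lst) - n + 1):
--         if sorted(lst[i:i+n]) == target:
--             c += 1
--     return c
-- ===== Notes on version B (the rewrite author's own statement) =====
-- stated objective: simpler
-- what changed: Replaced the incrementally maintained sliding-window Counter (per-step decrement/delete/increment and Counter equality) with a stateless per-window recompute: count the indices i where sorted(lst[i:i+n]) equals sorted(pat).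
import Mathlib
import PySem

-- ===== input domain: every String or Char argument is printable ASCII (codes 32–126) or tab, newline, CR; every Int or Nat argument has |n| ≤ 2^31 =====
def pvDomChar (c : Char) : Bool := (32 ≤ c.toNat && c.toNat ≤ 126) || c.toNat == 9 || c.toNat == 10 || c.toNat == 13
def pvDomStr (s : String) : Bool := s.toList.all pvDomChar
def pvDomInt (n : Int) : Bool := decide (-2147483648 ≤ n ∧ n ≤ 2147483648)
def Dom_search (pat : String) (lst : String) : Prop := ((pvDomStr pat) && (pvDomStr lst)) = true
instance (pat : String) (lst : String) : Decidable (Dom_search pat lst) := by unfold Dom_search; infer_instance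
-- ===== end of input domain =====

-- B replaces A's incrementally maintained sliding Counter with a per-window recompute
-- (sorted window == sorted pattern); simpler, same results, no maintained state.

-- ===== PORT A =====
-- Counter.__eq__ (Python >= 3.10): equal iff the counts agree on every key of either side
def pvCounterEq (d1 d2 : PySem.Dict Char Int) : Bool :=
  (d1.keys ++ d2.keys).all (fun ch => d1.getD ch 0 == d2.getD ch 0)

-- the body of A's for-loop (indices i-1 and i+n-1 are always in range inside the loop)
def searchBody (s : List Char) (n : Int) (l : PySem.Dict Char Int)
    (st : PySem.Dict Char Int × Int) (i : Int) : PySem.Dict Char Int × Int :=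
  let w := st.1
  let c := st.2
  let x := PySem.List.pyGetD s (i - 1) ' '
  let w := w.insert x (w.getD x 0 - 1)
  let w := if w.getD x 0 == 0 then w.erase x else w
  let y := PySem.List.pyGetD s (i + n - 1) ' '
  let w := w.insert y (w.getD y 0 + 1)
  let c := if pvCounterEq w l then c + 1 else c
  (w, c)

def search (pat : String) (lst : String) : Int :=
  let l := PySem.Dict.counter pat.toList
  let c : Int := 0
  let n : Int := (pat.toList.length : Int)
  let window := PySem.Dict.counter (PySem.List.slice lst.toList none (some n))
  let c := if pvCounterEq window l then c + 1 else c
  let res := (PySem.List.pyRange 1 ((lst.toList.length : Int) - n + 1) 1).foldl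
    (searchBody lst.toList n l) (window, c)
  res.2

-- ===== PORT B =====
def search_alt (pat : String) (lst : String) : Int :=
  let n : Int := (pat.toList.length : Int)
  let target := PySem.List.sorted pat.toList (fun x => x) false
  (PySem.List.pyRange 0 ((lst.toList.length : Int) - n + 1) 1).foldl
    (fun c i =>
      if PySem.List.sorted (PySem.List.slice lst.toList (some i) (some (i + n))) (fun x => x) false == target
      then c + 1 else c) (0 : Int)

-- ===== PRECONDITION & SPEC =====
def Spec_search (pat : String) (lst : String) (out : Int) : Prop := out = search_alt pat lst
instance (pat : String) (lst : String) (out : Int) : Decidable (Spec_search pat lst out) := by unfold Spec_search; infer_instance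

-- ===== CLAIM (what is proved, stated in full; the proofs are below) =====
def Claim_equal_search : Prop := ∀ (pat : String) (lst : String), Dom_search pat lst → Spec_search pat lst (search pat lst)

-- ===== LEMMAS AND PROOFS =====

theorem pvFindFilterNe (l : List (Char × Int)) (k k' : Char) (h : k' ≠ k) :
    (l.filter (fun p => !(p.1 == k))).find? (fun p => p.1 == k') = l.find? (fun p => p.1 == k') := by
  induction l with
  | nil => rfl
  | cons p t ih =>
    by_cases hp : p.1 = k
    · simp [List.filter_cons, List.find?_cons, hp, Ne.symm h, ih]
    · by_cases hq : p.1 = k'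
      · have hkeep : (!(p.1 == k)) = true := by simp [hq, h]
        rw [List.filter_cons, if_pos hkeep, List.find?_cons_of_pos (by simp [hq]),
          List.find?_cons_of_pos (by simp [hq])]
      · simp [List.filter_cons, List.find?_cons, hp, hq, ih]

theorem pvGetDEraseSelf (d : PySem.Dict Char Int) (k : Char) :
    (d.erase k).getD k 0 = 0 := by
  have : (d.erase k).get? k = none := by
    simp only [PySem.Dict.erase, PySem.Dict.get?, Option.map_eq_none_iff, List.find?_eq_none]
    intro p hp
    have := List.of_mem_filter hp
    simpa using this
  simp [PySem.Dict.getD, this]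

theorem pvGetDEraseNe (d : PySem.Dict Char Int) (k k' : Char) (h : k' ≠ k) :
    (d.erase k).getD k' 0 = d.getD k' 0 := by
  simp [PySem.Dict.getD, PySem.Dict.get?, PySem.Dict.erase, pvFindFilterNe d.items k k' h]

-- the three dict operations in A's loop body change each count by -[ch=x] + [ch=y]
theorem pvDictStep (w : PySem.Dict Char Int) (x y ch : Char) :
    ((let w1 := w.insert x (w.getD x 0 - 1);
      let w2 := if w1.getD x 0 == 0 then w1.erase x else w1;
      w2.insert y (w2.getD y 0 + 1)).getD ch 0)
      = w.getD ch 0 - (if ch = x then 1 else 0) + (if ch = y then 1 else 0) := by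
  have h2 : ∀ ch', ((if (w.insert x (w.getD x 0 - 1)).getD x 0 == 0
        then (w.insert x (w.getD x 0 - 1)).erase x
        else w.insert x (w.getD x 0 - 1)).getD ch' 0)
      = (w.insert x (w.getD x 0 - 1)).getD ch' 0 := by
    intro ch'
    by_cases hc : (w.insert x (w.getD x 0 - 1)).getD x 0 == 0
    · by_cases hx : ch' = x
      · subst hx
        rw [if_pos hc, pvGetDEraseSelf]
        exact ((beq_iff_eq).mp hc).symm
      · rw [if_pos hc, pvGetDEraseNe _ _ _ hx]
    · rw [if_neg hc]
  simp only [PySem.Dict.getD_insert, h2]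
  by_cases hy : ch = y <;> by_cases hx : ch = x <;>
    simp [hy, hx, PySem.Dict.getD_insert] <;> subst_vars <;>
    simp_all [PySem.Dict.getD_insert] <;> omega

-- sliding the window one step shifts each count by -[ch = s[j]] + [ch = s[j+n]]
theorem pvCountShift (s : List Char) (n j : Nat) (h : j + n < s.length) (ch : Char) :
    ((((s.drop (j+1)).take n).count ch : Int))
      = (((s.drop j).take n).count ch : Int)
        - (if ch = s.getD j ' ' then 1 else 0) + (if ch = s.getD (j+n) ' ' then 1 else 0) := by
  cases n with
  | zero => simp
  | succ m =>
    have hj : j < s.length := by omega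
    have hjm : j + 1 + m < s.length := by omega
    have hd : s.drop j = s.getD j ' ' :: s.drop (j+1) := by
      rw [List.getD_eq_getElem s ' ' hj]
      exact List.drop_eq_getElem_cons hj
    have hm : m < (s.drop (j+1)).length := by
      simp; omega
    have ht : (s.drop (j+1)).take (m+1) = (s.drop (j+1)).take m ++ [s.getD (j+(m+1)) ' '] := by
      have h1 : (s.drop (j+1))[m]? = some (s.getD (j+(m+1)) ' ') := by
        rw [List.getElem?_drop, show j+1+m = j+(m+1) by omega,
          List.getD_eq_getElem s ' ' (by omega), List.getElem?_eq_getElem (by omega)]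
      rw [List.take_succ, h1]
      simp
    rw [hd, List.take_succ_cons, ht]
    simp only [List.count_cons, List.count_append, List.count_nil]
    by_cases h1 : ch = s.getD j ' ' <;> by_cases h2 : ch = s.getD (j+(m+1)) ' ' <;>
      simp only [List.getD] at h1 h2 <;> simp [h1, h2] <;> (try split_ifs) <;>
      (try simp_all) <;> push_cast <;> omega

-- Counter equality against Counter(v), for any dict whose counts are those of u
theorem pvCounterEqIff (w : PySem.Dict Char Int) (u v : List Char)
    (hw : ∀ ch, w.getD ch 0 = (u.count ch : Int)) :
    (pvCounterEq w (PySem.Dict.counter v) = true) ↔ u.Perm v := by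
  unfold pvCounterEq
  rw [List.all_eq_true]
  constructor
  · intro h
    rw [List.perm_iff_count]
    intro ch
    by_cases hm : ch ∈ w.keys ++ (PySem.Dict.counter v).keys
    · have := (beq_iff_eq).mp (h ch hm)
      rw [hw, PySem.Dict.getD_counter] at this
      exact_mod_cast this
    · rw [List.mem_append] at hm
      push_neg at hm
      have h1 : w.getD ch 0 = 0 := by
        apply PySem.Dict.getD_of_not_contains
        rw [← Bool.not_eq_true, PySem.Dict.contains_iff_mem_keys]
        exact hm.1
      have h2 : ch ∉ v := by
        intro hv
        exact hm.2 (by rw [PySem.Dict.keys_counter, PySem.Set.mem_ofList]; exact hv)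
      rw [hw] at h1
      have : u.count ch = 0 := by exact_mod_cast h1
      rw [this, List.count_eq_zero_of_not_mem h2]
  · intro hp ch _
    rw [hw, PySem.Dict.getD_counter, List.perm_iff_count.mp hp ch]
    simp

-- A's loop, started at index j+1 with a window holding the counts of s[j:j+n],
-- adds 1 to c exactly at the indices whose window is an anagram of u
theorem pvLoop (s u : List Char) (k : Nat) :
    ∀ (j : Nat) (w : PySem.Dict Char Int) (c : Int),
    j + k + u.length ≤ s.length →
    (∀ ch, w.getD ch 0 = (((s.drop j).take u.length).count ch : Int)) →
    ((PySem.List.pyRange ((j:Int)+1) ((j:Int)+1+(k:Int)) 1).foldl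
        (searchBody s (u.length : Int) (PySem.Dict.counter u)) (w, c)).2
      = c + (((PySem.List.pyRange ((j:Int)+1) ((j:Int)+1+(k:Int)) 1).countP
          (fun i => decide (((s.drop i.toNat).take u.length).Perm u))) : Int) := by
  induction k with
  | zero =>
    intro j w c _ _
    rw [PySem.List.pyRange_one_eq_nil (by omega)]
    simp
  | succ k ih =>
    intro j w c hk hw
    rw [PySem.List.pyRange_one_cons (by push_cast; omega)]
    have hjn : j + u.length < s.length := by omega
    -- the step at index j+1
    have hx : PySem.List.pyGetD s ((j:Int)+1-1) ' ' = s.getD j ' ' := by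
      have : (j:Int)+1-1 = ((j:Nat):Int) := by omega
      rw [this, PySem.List.pyGetD_natCast]
    have hy : PySem.List.pyGetD s ((j:Int)+1+(u.length:Int)-1) ' ' = s.getD (j+u.length) ' ' := by
      have : (j:Int)+1+(u.length:Int)-1 = ((j+u.length : Nat):Int) := by push_cast; omega
      rw [this, PySem.List.pyGetD_natCast]
    -- compute the body
    have hbody : searchBody s (u.length : Int) (PySem.Dict.counter u) (w, c) ((j:Int)+1)
        = (let w1 := w.insert (s.getD j ' ') (w.getD (s.getD j ' ') 0 - 1);
           let w2 := if w1.getD (s.getD j ' ') 0 == 0 then w1.erase (s.getD j ' ') else w1;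
           let w3 := w2.insert (s.getD (j+u.length) ' ') (w2.getD (s.getD (j+u.length) ' ') 0 + 1);
           (w3, if pvCounterEq w3 (PySem.Dict.counter u) then c + 1 else c)) := by
      simp only [searchBody, hx, hy]
    rw [List.foldl_cons, hbody]
    rw [show ((j:Int)+1+1) = ((j+1:Nat):Int)+1 by push_cast; omega,
       show ((j:Int)+1+((k+1:Nat):Int)) = ((j+1:Nat):Int)+1+(k:Int) by push_cast; omega]
    set w3 := (let w1 := w.insert (s.getD j ' ') (w.getD (s.getD j ' ') 0 - 1);
           let w2 := if w1.getD (s.getD j ' ') 0 == 0 then w1.erase (s.getD j ' ') else w1;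
           w2.insert (s.getD (j+u.length) ' ') (w2.getD (s.getD (j+u.length) ' ') 0 + 1)) with hw3
    have hw3inv : ∀ ch, w3.getD ch 0 = (((s.drop (j+1)).take u.length).count ch : Int) := by
      intro ch
      rw [hw3]
      rw [pvDictStep w (s.getD j ' ') (s.getD (j+u.length) ' ') ch]
      rw [hw ch, pvCountShift s u.length j hjn ch]
    have hQ : (pvCounterEq w3 (PySem.Dict.counter u) = true)
        ↔ ((s.drop (j+1)).take u.length).Perm u :=
      pvCounterEqIff w3 _ u hw3inv
    have hpair : (let w1 := w.insert (s.getD j ' ') (w.getD (s.getD j ' ') 0 - 1);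
           let w2 := if w1.getD (s.getD j ' ') 0 == 0 then w1.erase (s.getD j ' ') else w1;
           let w3 := w2.insert (s.getD (j+u.length) ' ') (w2.getD (s.getD (j+u.length) ' ') 0 + 1);
           (w3, if pvCounterEq w3 (PySem.Dict.counter u) then c + 1 else c))
        = (w3, if pvCounterEq w3 (PySem.Dict.counter u) then c + 1 else c) := rfl
    rw [hpair]
    rw [ih (j+1) w3 _ (by omega) hw3inv]
    rw [List.countP_cons]
    have htn : ((j:Int)+1).toNat = j + 1 := by omega
    by_cases hQ' : ((s.drop (j+1)).take u.length).Perm u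
    · rw [if_pos (hQ.mpr hQ'), if_pos (by simp [htn, hQ'])]
      push_cast; ring
    · rw [if_neg (by rw [hQ]; exact hQ'), if_neg (by simp [htn, hQ'])]
      push_cast; ring

-- B counts the anagram windows directly
theorem pvAltCount (pat lst : String) :
    search_alt pat lst
      = ((PySem.List.pyRange 0 ((lst.toList.length : Int) - (pat.toList.length : Int) + 1) 1).countP
          (fun i => decide (((lst.toList.drop i.toNat).take pat.toList.length).Perm pat.toList)) : Int) := by
  unfold search_alt
  rw [PySem.List.foldl_if_add_one]
  rw [zero_add]
  congr 1
  apply List.countP_congr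
  intro i hi
  have h0 : 0 ≤ i := (PySem.List.mem_pyRange_one.mp hi).1
  have hcast : i = ((i.toNat : Nat) : Int) := by omega
  constructor
  · intro h
    have h' := beq_iff_eq.mp h
    rw [hcast, PySem.List.slice_natCast_add] at h'
    exact decide_eq_true ((PySem.List.sorted_id_eq_sorted_id_iff_perm _ _).mp h')
  · intro h
    apply beq_iff_eq.mpr
    rw [hcast, PySem.List.slice_natCast_add]
    exact (PySem.List.sorted_id_eq_sorted_id_iff_perm _ _).mpr (of_decide_eq_true h)

theorem pvMain (pat lst : String) : search pat lst = search_alt pat lst := by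
  by_cases hn : pat.toList.length ≤ lst.toList.length
  · -- the window fits at least once
    unfold search
    simp only
    rw [pvAltCount]
    have hinit : ∀ ch, (PySem.Dict.counter (PySem.List.slice lst.toList none (some (pat.toList.length : Int)))).getD ch 0
        = (((lst.toList.drop 0).take pat.toList.length).count ch : Int) := by
      intro ch
      rw [PySem.Dict.getD_counter, PySem.List.slice_to_natCast]
      simp
    have hc0 : (pvCounterEq (PySem.Dict.counter (PySem.List.slice lst.toList none (some (pat.toList.length : Int))))
          (PySem.Dict.counter pat.toList) = true) ↔ ((lst.toList.drop 0).take pat.toList.length).Perm pat.toList :=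
      pvCounterEqIff _ _ pat.toList hinit
    have hloop := pvLoop lst.toList pat.toList (lst.toList.length - pat.toList.length) 0 _
      (if pvCounterEq (PySem.Dict.counter (PySem.List.slice lst.toList none (some (pat.toList.length : Int))))
          (PySem.Dict.counter pat.toList) then 0 + 1 else 0) (by omega) hinit
    simp only [Nat.cast_zero, zero_add] at hloop
    rw [show ((lst.toList.length : Int) - (pat.toList.length : Int) + 1)
        = 1 + ((lst.toList.length - pat.toList.length : Nat) : Int) by push_cast; omega]
    simp only [zero_add]
    rw [hloop]
    rw [PySem.List.pyRange_one_cons (a := 0) (by positivity), List.countP_cons]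
    simp only [Int.toNat_zero, zero_add]
    by_cases hQ0 : ((lst.toList.drop 0).take pat.toList.length).Perm pat.toList
    · rw [if_pos (hc0.mpr hQ0)]
      simp only [List.drop_zero] at hQ0
      rw [if_pos (by simpa using hQ0)]
      push_cast; ring
    · rw [if_neg (by rw [hc0]; exact hQ0)]
      simp only [List.drop_zero] at hQ0
      rw [if_neg (by simpa using hQ0)]
      push_cast; ring
  · -- pattern longer than the list: both count zero windows
    unfold search
    simp only
    rw [pvAltCount]
    rw [PySem.List.pyRange_one_eq_nil (a := 1) (by push_cast; omega)]
    rw [PySem.List.pyRange_one_eq_nil (a := 0) (by push_cast; omega)]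
    simp only [List.foldl_nil, List.countP_nil, Nat.cast_zero]
    have hinit : ∀ ch, (PySem.Dict.counter (PySem.List.slice lst.toList none (some (pat.toList.length : Int)))).getD ch 0
        = ((lst.toList.take pat.toList.length).count ch : Int) := by
      intro ch
      rw [PySem.Dict.getD_counter, PySem.List.slice_to_natCast]
    rw [if_neg]
    intro hEq
    have hp := (pvCounterEqIff _ _ pat.toList hinit).mp hEq
    have := hp.length_eq
    rw [List.length_take] at this
    omega

-- ===== VERDICT (by name: the statement is the Claim_ definition above) =====
theorem search_spec : Claim_equal_search := by
  intro pat lst _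
  unfold Spec_search
  exact pvMain pat lst
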